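-- pv_equiv track=rewrite | github.com/YuxianMeng/ASTE-Glove-Bert | evaluation_bert.py | find_grid_term
-- ===== SOURCE A (Python) =====
-- def find_grid_term(label_matrix):
--     length = len(label_matrix)
--     triple = []
--     for i in range(length):
--         for j in range(length):
--             aspect_index, opinion_index = [], []
--             if label_matrix[i][j] == 1:
--                 aspect_index.append(i)
--                 opinion_index.append(j)
--                 tem_a, tem_o = i, j
--                 for t in range(tem_a, length):
--                     if label_matrix[t][tem_o]==2:
--                         aspect_index.append(t)
--                 for t in range(tem_o, length):
--                     if label_matrix[tem_a][t]==2: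
--                         opinion_index.append(t)
--
--             if aspect_index != [] and opinion_index != [] and aspect_index == opinion_index:
--                 triple.append(aspect_index)
--     return triple
-- ===== SOURCE B (Python) =====
-- def find_grid_term(label_matrix):
--     n = len(label_matrix)
--     triple = []
--     for i in range(n):
--         if label_matrix[i][i] == 1:
--             aspect = [i] + [t for t in range(i + 1, n) if label_matrix[t][i] == 2]
--             opinion = [i] + [t for t in range(i + 1, n) if label_matrix[i][t] == 2]
--             if aspect == opinion:
--                 triple.append(aspect)
--     return triple
-- ===== Notes on version B (the rewrite author's own statement) =====
-- stated objective: faster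
-- what changed: A scans all n^2 cells and builds both index chains for every '1' cell, but the chains can only be equal when they start with the same index, i.e. on the diagonal; B scans only the n diagonal cells and builds the chains by comprehension, dropping a factor of n.
-- outside the precondition, e.g. on find_grid_term([[1, 1], [2]]): A raises IndexError, B raises IndexError
import Mathlib
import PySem

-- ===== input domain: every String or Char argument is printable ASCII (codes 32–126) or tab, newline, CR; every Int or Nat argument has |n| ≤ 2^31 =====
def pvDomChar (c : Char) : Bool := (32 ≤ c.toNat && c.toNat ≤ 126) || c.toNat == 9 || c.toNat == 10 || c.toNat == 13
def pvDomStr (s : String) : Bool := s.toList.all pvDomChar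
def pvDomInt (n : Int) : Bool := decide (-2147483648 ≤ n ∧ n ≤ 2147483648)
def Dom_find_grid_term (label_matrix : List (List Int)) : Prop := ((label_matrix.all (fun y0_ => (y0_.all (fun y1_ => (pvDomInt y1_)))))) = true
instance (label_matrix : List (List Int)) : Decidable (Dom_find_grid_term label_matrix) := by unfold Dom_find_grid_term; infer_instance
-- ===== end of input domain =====

-- B scans only the diagonal cells (the only ones whose index chains can be equal) instead of all n^2 cells: asymptotically faster, same return value.


-- ===== PORT A =====
-- m[i][j]: exact (the Python indexing raises nothing) whenever 0 ≤ i,j < m.length ≤ each row's length,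
-- which Pre_find_grid_term guarantees for every access the programs make.
def mget (m : List (List Int)) (i j : Int) : Int :=
  PySem.List.pyGetD (PySem.List.pyGetD m i []) j 0

def find_grid_term (label_matrix : List (List Int)) : List (List Int) :=
  let n : Int := label_matrix.length
  (PySem.List.pyRange 0 n 1).foldl (fun triple i =>
    (PySem.List.pyRange 0 n 1).foldl (fun triple j =>
      let p : List Int × List Int :=
        if mget label_matrix i j = 1 then
          ((PySem.List.pyRange i n 1).foldl
              (fun a t => if mget label_matrix t j = 2 then a ++ [t] else a) ([] ++ [i]),
           (PySem.List.pyRange j n 1).foldl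
              (fun o t => if mget label_matrix i t = 2 then o ++ [t] else o) ([] ++ [j]))
        else ([], [])
      if p.1 ≠ [] ∧ p.2 ≠ [] ∧ p.1 = p.2 then triple ++ [p.1] else triple) triple) []

-- ===== PORT B =====
def find_grid_term_alt (label_matrix : List (List Int)) : List (List Int) :=
  let n : Int := label_matrix.length
  (PySem.List.pyRange 0 n 1).foldl (fun triple i =>
    if mget label_matrix i i = 1 then
      let aspect := i :: (PySem.List.pyRange (i+1) n 1).filter (fun t => mget label_matrix t i = 2)
      let opinion := i :: (PySem.List.pyRange (i+1) n 1).filter (fun t => mget label_matrix i t = 2)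
      if aspect = opinion then triple ++ [aspect] else triple
    else triple) []

-- ===== PRECONDITION & SPEC =====
-- Pre_ excludes exactly the ragged grids on which Python A raises IndexError
-- (A reads label_matrix[i][j] for every i, j < len(label_matrix)).
def Pre_find_grid_term (label_matrix : List (List Int)) : Prop :=
  ∀ row ∈ label_matrix, label_matrix.length ≤ row.length
instance (label_matrix : List (List Int)) : Decidable (Pre_find_grid_term label_matrix) := by
  unfold Pre_find_grid_term; infer_instance

def pvWitness_find_grid_term : List (List Int) := [[1, 2], [2, 0]]

def Spec_find_grid_term (label_matrix : List (List Int)) (out : List (List Int)) : Prop := out = find_grid_term_alt label_matrix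
instance (label_matrix : List (List Int)) (out : List (List Int)) : Decidable (Spec_find_grid_term label_matrix out) := by unfold Spec_find_grid_term; infer_instance

-- ===== CLAIM (what is proved, stated in full; the proofs are below) =====
def Claim_equal_find_grid_term : Prop := ∀ (label_matrix : List (List Int)), Dom_find_grid_term label_matrix → Pre_find_grid_term label_matrix → Spec_find_grid_term label_matrix (find_grid_term label_matrix)

-- ===== LEMMAS AND PROOFS =====

-- a fold whose step is the identity on every list element does nothing
theorem foldl_id_of_mem {α β : Type} (f : β → α → β) :
    ∀ (l : List α), (∀ acc x, x ∈ l → f acc x = acc) → ∀ acc, l.foldl f acc = acc := by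
  intro l
  induction l with
  | nil => intro _ acc; rfl
  | cons x xs ih =>
      intro h acc
      simp only [List.foldl_cons, h acc x (by simp)]
      exact ih (fun acc y hy => h acc y (by simp [hy])) acc

-- a fold over a strictly increasing list whose step is the identity except at the single element i
theorem foldl_single {β : Type} (f : β → Int → β) (i : Int) :
    ∀ (l : List Int), l.Pairwise (· < ·) → i ∈ l →
      (∀ acc j, j ∈ l → j ≠ i → f acc j = acc) → ∀ acc, l.foldl f acc = f acc i := by
  intro l
  induction l with
  | nil => intro _ h; simp at h
  | cons x xs ih =>
      intro hpw hmem hid acc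
      rcases List.pairwise_cons.mp hpw with ⟨hlt, hpw'⟩
      by_cases hx : x = i
      · subst hx
        simp only [List.foldl_cons]
        exact foldl_id_of_mem f xs
          (fun acc j hj => hid acc j (by simp [hj]) (ne_of_gt (hlt j hj))) (f acc x)
      · have hmem' : i ∈ xs := by
          rcases List.mem_cons.mp hmem with h | h
          · exact absurd h.symm hx
          · exact h
        simp only [List.foldl_cons, hid acc x (by simp) hx]
        exact ih hpw' hmem' (fun acc j hj hji => hid acc j (by simp [hj]) hji) acc

-- A's inner cell step at column j, row i (exactly the inner lambda of the port of A)
def cellStep (m : List (List Int)) (i : Int) (triple : List (List Int)) (j : Int) :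
    List (List Int) :=
  let p : List Int × List Int :=
    if mget m i j = 1 then
      ((PySem.List.pyRange i (m.length : Int) 1).foldl
          (fun a t => if mget m t j = 2 then a ++ [t] else a) ([] ++ [i]),
       (PySem.List.pyRange j (m.length : Int) 1).foldl
          (fun o t => if mget m i t = 2 then o ++ [t] else o) ([] ++ [j]))
    else ([], [])
  if p.1 ≠ [] ∧ p.2 ≠ [] ∧ p.1 = p.2 then triple ++ [p.1] else triple

-- the chain-building folds of A are prepend-then-filter
theorem aspect_fold (m : List (List Int)) (j a : Int) (init : List Int) :
    (PySem.List.pyRange a (m.length : Int) 1).foldl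
        (fun acc t => if mget m t j = 2 then acc ++ [t] else acc) init
      = init ++ (PySem.List.pyRange a (m.length : Int) 1).filter
          (fun t => mget m t j = 2) := by
  simpa using PySem.List.foldl_append_if
    (fun t => decide (mget m t j = 2)) (fun t => t)
    (PySem.List.pyRange a (m.length : Int) 1) init

theorem opinion_fold (m : List (List Int)) (i a : Int) (init : List Int) :
    (PySem.List.pyRange a (m.length : Int) 1).foldl
        (fun acc t => if mget m i t = 2 then acc ++ [t] else acc) init
      = init ++ (PySem.List.pyRange a (m.length : Int) 1).filter
          (fun t => mget m i t = 2) := by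
  simpa using PySem.List.foldl_append_if
    (fun t => decide (mget m i t = 2)) (fun t => t)
    (PySem.List.pyRange a (m.length : Int) 1) init

-- off the diagonal the cell contributes nothing: the two chains start with different indices
theorem cell_id (m : List (List Int)) (i j : Int) (hij : j ≠ i) (triple : List (List Int)) :
    cellStep m i triple j = triple := by
  unfold cellStep
  by_cases h1 : mget m i j = 1
  · rw [if_pos h1]
    rw [aspect_fold, opinion_fold]
    simp only [List.nil_append]
    rw [if_neg]
    rintro ⟨-, -, heq⟩
    injection heq with h
    exact hij h.symm
  · simp [h1]

-- on the diagonal the cell step is exactly B's step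
theorem cell_diag (m : List (List Int)) (i : Int) (hin : i < (m.length : Int))
    (triple : List (List Int)) :
    cellStep m i triple i =
      (if mget m i i = 1 then
        if (i :: (PySem.List.pyRange (i+1) (m.length : Int) 1).filter
              (fun t => mget m t i = 2))
            = (i :: (PySem.List.pyRange (i+1) (m.length : Int) 1).filter
              (fun t => mget m i t = 2))
          then triple ++ [i :: (PySem.List.pyRange (i+1) (m.length : Int) 1).filter
              (fun t => mget m t i = 2)]
          else triple
      else triple) := by
  unfold cellStep
  by_cases h1 : mget m i i = 1
  · have hr : PySem.List.pyRange i (m.length : Int) 1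
        = i :: PySem.List.pyRange (i+1) (m.length : Int) 1 :=
      PySem.List.pyRange_one_cons hin
    simp only [h1, hr, List.foldl_cons, List.nil_append]
    norm_num
    rw [aspect_fold, opinion_fold]
    simp
  · simp [h1]

-- ===== VERDICT (by name: the statement is the Claim_ definition above) =====
theorem find_grid_term_spec : Claim_equal_find_grid_term := by
  intro m _ _
  unfold Spec_find_grid_term find_grid_term find_grid_term_alt
  simp only []
  refine PySem.List.foldl_congr_mem _ _ _ _ ?_
  intro acc i hi
  rcases PySem.List.mem_pyRange_one.mp hi with ⟨-, hn⟩
  have hstep : (PySem.List.pyRange 0 (m.length : Int) 1).foldl (cellStep m i) acc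
      = cellStep m i acc i :=
    foldl_single (cellStep m i) i _ (PySem.List.pairwise_lt_pyRange_one 0 (m.length : Int)) hi
      (fun acc j _ hji => cell_id m i j hji acc) acc
  calc (PySem.List.pyRange 0 (m.length : Int) 1).foldl (cellStep m i) acc
      = cellStep m i acc i := hstep
    _ = _ := cell_diag m i hn acc
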